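-- pv_equiv track=rewrite | github.com/Weyaaron/export_from_ovy | src/mine.py | filter_temps
-- ===== SOURCE A (Python) =====
-- from typing import List
--
-- def filter_temps(triples) -> List:
--
--     past_index = False
--     temp_list = []
--
--     for tuple_el in triples:
--         if tuple_el[2] == "PERIODE":
--             past_index = False
--         if past_index:
--             temp_list.append(tuple_el)
--         if tuple_el[2] == "BT":
--             past_index = True
--
--     result = []
--     for i in range(0, len(temp_list) - 1, 2):
--         final_temp = temp_list[i][2] + temp_list[i + 1][2]
--         final_temp = final_temp.replace(",", ".")
--         result.append((temp_list[i][0], temp_list[i][1], final_temp.strip('"')))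
--
--     return result
-- ===== SOURCE B (Python) =====
-- def filter_temps(triples):
--     # One linear scan: keep the marker flag and a single pending half instead of
--     # materialising the filtered list and pairing it in a second indexed pass.
--     past_index = False
--     pending = None
--     result = []
--     for tuple_el in triples:
--         if tuple_el[2] == "PERIODE":
--             past_index = False
--         if past_index:
--             if pending is None:
--                 pending = tuple_el
--             else:
--                 final_temp = (pending[2] + tuple_el[2]).replace(",", ".")
--                 result.append((pending[0], pending[1], final_temp.strip('"')))
--                 pending = None
--         if tuple_el[2] == "BT":
--             past_index = True
--     return result
-- ===== Notes on version B (the rewrite author's own statement) =====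
-- stated objective: simpler
-- what changed: Fused A's two passes (filter the marked triples into temp_list, then pair them in a second indexed range(0,len-1,2) loop) into one linear scan that keeps only a single pending half and emits each pair as soon as it is completed.
import Mathlib
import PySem

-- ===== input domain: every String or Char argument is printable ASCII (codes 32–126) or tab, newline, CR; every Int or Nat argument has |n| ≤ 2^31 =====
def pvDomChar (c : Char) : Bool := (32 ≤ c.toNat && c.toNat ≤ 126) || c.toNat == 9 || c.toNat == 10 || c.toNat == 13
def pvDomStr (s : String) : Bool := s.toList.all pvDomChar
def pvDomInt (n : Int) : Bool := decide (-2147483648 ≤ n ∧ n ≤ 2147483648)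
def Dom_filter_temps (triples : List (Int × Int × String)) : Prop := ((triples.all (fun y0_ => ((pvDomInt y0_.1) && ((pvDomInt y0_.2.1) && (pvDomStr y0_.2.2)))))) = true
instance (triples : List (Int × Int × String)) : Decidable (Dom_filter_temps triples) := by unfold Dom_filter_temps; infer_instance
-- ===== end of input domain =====

-- B fuses A's two passes (filter into temp_list, then pair by indexed range(0, len-1, 2))
-- into one scan holding a single pending half; objective: simpler, same O(n) cost.

-- ===== PORT A =====
-- first loop of A: maintain (past_index, temp_list)
def filter_temps_loop1 (st : Bool × List (Int × Int × String)) (tuple_el : Int × Int × String) :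
    Bool × List (Int × Int × String) :=
  let past_index := if tuple_el.2.2 = "PERIODE" then false else st.1
  let temp_list := if past_index then st.2 ++ [tuple_el] else st.2
  let past_index := if tuple_el.2.2 = "BT" then true else past_index
  (past_index, temp_list)

def filter_temps (triples : List (Int × Int × String)) : List (Int × Int × String) :=
  let temp_list := (triples.foldl filter_temps_loop1 (false, [])).2
  -- range(0, len(temp_list)-1, 2): both indices i, i+1 are always in range, so pyGetD is exact
  (PySem.List.pyRange 0 ((temp_list.length : Int) - 1) 2).foldl
    (fun result i =>
      let a := PySem.List.pyGetD temp_list i (0, 0, "")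
      let b := PySem.List.pyGetD temp_list (i + 1) (0, 0, "")
      let final_temp := PySem.Str.replace (a.2.2 ++ b.2.2) "," "."
      result ++ [(a.1, a.2.1, PySem.Str.stripChars final_temp "\"")])
    []

-- ===== PORT B =====
-- single fused loop of B: maintain (past_index, pending, result)
def filter_temps_alt_loop
    (st : Bool × Option (Int × Int × String) × List (Int × Int × String))
    (tuple_el : Int × Int × String) :
    Bool × Option (Int × Int × String) × List (Int × Int × String) :=
  let past_index := if tuple_el.2.2 = "PERIODE" then false else st.1
  let pr :=
    if past_index then
      match st.2.1 with
      | none => (some tuple_el, st.2.2)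
      | some pending =>
        let final_temp := PySem.Str.replace (pending.2.2 ++ tuple_el.2.2) "," "."
        (none, st.2.2 ++ [(pending.1, pending.2.1, PySem.Str.stripChars final_temp "\"")])
    else (st.2.1, st.2.2)
  (if tuple_el.2.2 = "BT" then true else past_index, pr)

def filter_temps_alt (triples : List (Int × Int × String)) : List (Int × Int × String) :=
  (triples.foldl filter_temps_alt_loop (false, none, [])).2.2

-- ===== PRECONDITION & SPEC =====
def Spec_filter_temps (triples : List (Int × Int × String)) (out : List (Int × Int × String)) : Prop := out = filter_temps_alt triples
instance (triples : List (Int × Int × String)) (out : List (Int × Int × String)) : Decidable (Spec_filter_temps triples out) := by unfold Spec_filter_temps; infer_instance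

-- ===== CLAIM (what is proved, stated in full; the proofs are below) =====
def Claim_equal_filter_temps : Prop := ∀ (triples : List (Int × Int × String)), Dom_filter_temps triples → Spec_filter_temps triples (filter_temps triples)

-- ===== LEMMAS AND PROOFS =====

-- the pair A's second loop builds from two halves
def pvMk (p x : Int × Int × String) : Int × Int × String :=
  (p.1, p.2.1, PySem.Str.stripChars (PySem.Str.replace (p.2.2 ++ x.2.2) "," ".") "\"")

-- feed a filtered segment into B's (pending, result) state
def pvAbsorb : Option (Int × Int × String) → List (Int × Int × String) →
    List (Int × Int × String) → Option (Int × Int × String) × List (Int × Int × String)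
  | pend, res, [] => (pend, res)
  | none, res, x :: xs => pvAbsorb (some x) res xs
  | some p, res, x :: xs => pvAbsorb none (res ++ [pvMk p x]) xs

-- consecutive disjoint pairs, trailing element dropped
def pvPairs : List (Int × Int × String) → List (Int × Int × String)
  | [] => []
  | [_] => []
  | a :: b :: r => pvMk a b :: pvPairs r

def pvPairsP : Option (Int × Int × String) → List (Int × Int × String) → List (Int × Int × String)
  | none, tl => pvPairs tl
  | some p, tl => pvPairs (p :: tl)

theorem pvLoop1_acc (ts : List (Int × Int × String)) (p : Bool) (acc : List (Int × Int × String)) :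
    ts.foldl filter_temps_loop1 (p, acc) =
      ((ts.foldl filter_temps_loop1 (p, [])).1, acc ++ (ts.foldl filter_temps_loop1 (p, [])).2) := by
  induction ts generalizing p acc with
  | nil => simp
  | cons t ts ih =>
    simp only [List.foldl_cons, filter_temps_loop1]
    by_cases h : (if t.2.2 = "PERIODE" then false else p) = true <;>
      simp [h, ih _ (acc ++ [t]), ih _ [t], ih _ acc]

theorem pvFused (ts : List (Int × Int × String)) (p : Bool)
    (pend : Option (Int × Int × String)) (res : List (Int × Int × String)) :
    ts.foldl filter_temps_alt_loop (p, pend, res) =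
      ((ts.foldl filter_temps_loop1 (p, [])).1,
        pvAbsorb pend res (ts.foldl filter_temps_loop1 (p, [])).2) := by
  induction ts generalizing p pend res with
  | nil => simp [pvAbsorb]
  | cons t ts ih =>
    simp only [List.foldl_cons, filter_temps_alt_loop, filter_temps_loop1]
    by_cases h : (if t.2.2 = "PERIODE" then false else p) = true
    · rw [if_pos h, if_pos h]
      cases pend with
      | none => simp [ih, pvLoop1_acc ts _ [t], pvAbsorb]
      | some q => simp [ih, pvLoop1_acc ts _ [t], pvAbsorb, pvMk]
    · rw [if_neg h, if_neg h]
      simp only [ih]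

theorem pvAbsorb_pairs (pend : Option (Int × Int × String))
    (res tl : List (Int × Int × String)) :
    (pvAbsorb pend res tl).2 = res ++ pvPairsP pend tl := by
  induction pend, res, tl using pvAbsorb.induct with
  | case1 pend res => cases pend <;> simp [pvAbsorb, pvPairsP, pvPairs]
  | case2 res x xs ih => simpa [pvAbsorb, pvPairsP, pvPairs] using ih
  | case3 p res x xs ih => simp [pvAbsorb, pvPairsP, pvPairs, ih]

-- range(0, n-1, 2) as a mapped List.range
theorem pvRange_two (n : Nat) :
    PySem.List.pyRange 0 ((n : Int) - 1) 2 =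
      (List.range (n / 2)).map (fun k => ((2 * k : Nat) : Int)) := by
  rw [PySem.List.pyRange_of_pos 0 ((n : Int) - 1) (by norm_num)]
  by_cases h : (0 : Int) < (n : Int) - 1
  · rw [if_pos h]
    have h2 : (2 : Nat) ≤ n := by omega
    have : (((n : Int) - 1 - 0 + 2 - 1) / 2).toNat = n / 2 := by
      have : ((n : Int) - 1 - 0 + 2 - 1) = (n : Int) := by ring
      rw [this]
      omega
    rw [this]
    simp
  · rw [if_neg h]
    have : n / 2 = 0 := by omega
    simp [this]

theorem pvPairs_idx (tl : List (Int × Int × String)) :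
    (List.range (tl.length / 2)).map
        (fun k => pvMk (tl.getD (2 * k) (0, 0, "")) (tl.getD (2 * k + 1) (0, 0, ""))) =
      pvPairs tl := by
  induction tl using pvPairs.induct with
  | case1 => simp [pvPairs]
  | case2 a => simp [pvPairs]
  | case3 a b r ih =>
    have hlen : (a :: b :: r).length / 2 = r.length / 2 + 1 := by
      simp only [List.length_cons]; omega
    rw [hlen, List.range_succ_eq_map, List.map_cons, List.map_map]
    simp only [pvPairs]
    refine congrArg₂ List.cons rfl ?_
    rw [← ih]
    apply List.map_congr_left
    intro k _
    have h1 : 2 * (k + 1) = 2 * k + 2 := by ring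
    simp [Function.comp, h1, List.getD]

theorem pvFlatMap_singleton {a b : Type} (g : a → b) (l : List a) :
    l.flatMap (fun x => [g x]) = l.map g := by
  induction l with
  | nil => rfl
  | cons x l ih => simp [List.flatMap_cons, ih]

theorem filter_temps_eq_pairs (triples : List (Int × Int × String)) :
    filter_temps triples = pvPairs (triples.foldl filter_temps_loop1 (false, [])).2 := by
  unfold filter_temps
  dsimp only
  set tl := (triples.foldl filter_temps_loop1 (false, [])).2 with htl
  rw [pvRange_two tl.length]
  rw [show (fun (result : List (Int × Int × String)) (i : Int) =>
        let a := PySem.List.pyGetD tl i (0, 0, "")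
        let b := PySem.List.pyGetD tl (i + 1) (0, 0, "")
        let final_temp := PySem.Str.replace (a.2.2 ++ b.2.2) "," "."
        result ++ [(a.1, a.2.1, PySem.Str.stripChars final_temp "\"")]) =
      (fun result i => result ++
        [pvMk (PySem.List.pyGetD tl i (0, 0, "")) (PySem.List.pyGetD tl (i + 1) (0, 0, ""))])
    from rfl]
  rw [List.foldl_map, PySem.List.foldl_append_eq_flatMap, pvFlatMap_singleton]
  rw [← pvPairs_idx tl]
  simp only [List.nil_append]
  apply List.map_congr_left
  intro k _
  have h1 : ((2 * k : Nat) : Int) + 1 = ((2 * k + 1 : Nat) : Int) := by push_cast; ring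
  rw [h1, PySem.List.pyGetD_natCast, PySem.List.pyGetD_natCast]

-- ===== VERDICT (by name: the statement is the Claim_ definition above) =====
theorem filter_temps_spec : Claim_equal_filter_temps := by
  intro triples _
  unfold Spec_filter_temps
  rw [filter_temps_eq_pairs]
  unfold filter_temps_alt
  rw [pvFused, pvAbsorb_pairs]
  simp [pvPairsP]
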